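-- pv_equiv track=rewrite | github.com/bychanlee/rubato-skills | skills/psi-new-calc/new_calc.py | _ordered_metadata
-- ===== SOURCE A (Python) =====
-- from typing import Any, Generator
--
-- CALC_KEY_ORDER = [
--     "id", "title", "date", "status", "code", "computer", "tags",
--     "parents", "children", "reports", "hpc_path", "key_results", "notes",
-- ]
--
-- def _ordered_metadata(metadata: dict) -> list[tuple[str, Any]]:
--     ordered = []
--     for k in CALC_KEY_ORDER:
--         if k in metadata:
--             ordered.append((k, metadata[k]))
--     for k in metadata:
--         if k not in CALC_KEY_ORDER:
--             ordered.append((k, metadata[k]))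
--     return ordered
-- ===== SOURCE B (Python) =====
-- CALC_KEY_ORDER = [
--     "id", "title", "date", "status", "code", "computer", "tags",
--     "parents", "children", "reports", "hpc_path", "key_results", "notes",
-- ]
--
-- def _ordered_metadata(metadata: dict) -> list:
--     known = [kv for kv in metadata.items() if kv[0] in CALC_KEY_ORDER]
--     unknown = [kv for kv in metadata.items() if kv[0] not in CALC_KEY_ORDER]
--     return sorted(known, key=lambda kv: CALC_KEY_ORDER.index(kv[0])) + unknown
-- ===== Notes on version B (the rewrite author's own statement) =====
-- stated objective: simpler
-- what changed: Replaces A's two append loops (one scanning CALC_KEY_ORDER with a dict lookup per key, one scanning the dict) by a single partition of the items plus a stable sort of the known part keyed by CALC_KEY_ORDER.index.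
import Mathlib
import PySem

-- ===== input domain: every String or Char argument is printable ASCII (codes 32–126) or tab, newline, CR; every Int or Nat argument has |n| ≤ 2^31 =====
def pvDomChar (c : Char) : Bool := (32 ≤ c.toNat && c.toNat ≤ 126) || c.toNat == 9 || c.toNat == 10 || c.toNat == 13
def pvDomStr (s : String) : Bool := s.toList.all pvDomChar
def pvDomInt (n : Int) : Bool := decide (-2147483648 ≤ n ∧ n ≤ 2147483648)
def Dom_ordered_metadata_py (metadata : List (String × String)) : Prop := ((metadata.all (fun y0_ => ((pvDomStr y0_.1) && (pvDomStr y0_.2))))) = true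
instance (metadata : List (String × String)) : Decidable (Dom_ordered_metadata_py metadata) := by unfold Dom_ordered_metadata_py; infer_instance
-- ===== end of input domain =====

-- B replaces A's two append loops by one partition of the items plus a stable sort of the
-- known part keyed by CALC_KEY_ORDER.index (objective: simpler).

-- ===== PORT A =====
def CALC_KEY_ORDER : List String :=
  ["id", "title", "date", "status", "code", "computer", "tags",
   "parents", "children", "reports", "hpc_path", "key_results", "notes"]

-- literal transliteration of A: first loop over CALC_KEY_ORDER appending present keys,
-- then a loop over the dict's keys appending the keys not in CALC_KEY_ORDER.
-- metadata[k] is ported as getD with an unreachable default: both uses are guarded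
-- by membership, where Python's metadata[k] returns normally.
def ordered_metadata_py (metadata : List (String × String)) : List (String × String) :=
  let d : PySem.Dict String String := PySem.Dict.mk metadata
  let ordered := CALC_KEY_ORDER.foldl
    (fun acc k => if d.contains k then acc ++ [(k, d.getD k "")] else acc) []
  d.keys.foldl
    (fun acc k => if !(CALC_KEY_ORDER.contains k) then acc ++ [(k, d.getD k "")] else acc) ordered

-- ===== PORT B =====
-- transliteration of Source B: partition the items, stable-sort the known part by
-- CALC_KEY_ORDER.index. list.index is ported as index? with default 0: it is only
-- applied to keys the filter has checked are members, where Python's .index returns.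
def ordered_metadata_py_alt (metadata : List (String × String)) : List (String × String) :=
  let items := (PySem.Dict.mk metadata).items
  let known := items.filter (fun kv => CALC_KEY_ORDER.contains kv.1)
  let unknown := items.filter (fun kv => !(CALC_KEY_ORDER.contains kv.1))
  PySem.List.sorted known (fun kv => (PySem.List.index? CALC_KEY_ORDER kv.1).getD 0) false ++ unknown

-- ===== PRECONDITION & SPEC =====
-- Pre_ excludes only association lists with duplicate keys: a Python dict has unique keys,
-- so such lists encode no input A ever receives (A returns on every dict).
def Pre_ordered_metadata_py (metadata : List (String × String)) : Prop :=
  (metadata.map Prod.fst).Nodup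

instance (metadata : List (String × String)) : Decidable (Pre_ordered_metadata_py metadata) := by
  unfold Pre_ordered_metadata_py; infer_instance

def pvWitness_ordered_metadata_py : (List (String × String)) :=
  [("notes", "n"), ("id", "7"), ("extra", "x")]

def Spec_ordered_metadata_py (metadata : List (String × String)) (out : List (String × String)) : Prop := out = ordered_metadata_py_alt metadata
instance (metadata : List (String × String)) (out : List (String × String)) : Decidable (Spec_ordered_metadata_py metadata out) := by unfold Spec_ordered_metadata_py; infer_instance

-- ===== CLAIM (what is proved, stated in full; the proofs are below) =====
def Claim_equal_ordered_metadata_py : Prop := ∀ (metadata : List (String × String)), Dom_ordered_metadata_py metadata → Pre_ordered_metadata_py metadata → Spec_ordered_metadata_py metadata (ordered_metadata_py metadata)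

-- ===== LEMMAS AND PROOFS =====

-- the key function of B's sort
def pvKeyIdx (kv : String × String) : Nat :=
  (PySem.List.index? CALC_KEY_ORDER kv.1).getD 0

-- strict increase of the index key along CALC_KEY_ORDER (a concrete list: decide)
theorem pvOrder_pairwise :
    CALC_KEY_ORDER.Pairwise
      (fun a b => (PySem.List.index? CALC_KEY_ORDER a).getD 0 <
                  (PySem.List.index? CALC_KEY_ORDER b).getD 0) := by decide

theorem pvOrder_nodup : CALC_KEY_ORDER.Nodup := by decide

-- under unique keys, the dict lookup returns the pair's own value
theorem pvGetD_self (metadata : List (String × String))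
    (hnd : (metadata.map Prod.fst).Nodup) {p : String × String} (hp : p ∈ metadata) :
    (PySem.Dict.mk metadata).getD p.1 "" = p.2 :=
  PySem.Dict.getD_of_mem_items (d := PySem.Dict.mk metadata) (k := p.1) (v := p.2) hp hnd ""

-- A's first loop equals the sorted known part of B
theorem pvFront_eq (metadata : List (String × String))
    (hnd : (metadata.map Prod.fst).Nodup) :
    PySem.List.sorted (metadata.filter (fun kv => CALC_KEY_ORDER.contains kv.1)) pvKeyIdx false
      = (CALC_KEY_ORDER.filter (fun k => (PySem.Dict.mk metadata).contains k)).map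
          (fun k => (k, (PySem.Dict.mk metadata).getD k "")) := by
  set d := PySem.Dict.mk metadata with hd
  set F := (CALC_KEY_ORDER.filter (fun k => d.contains k)).map
      (fun k => (k, d.getD k "")) with hF
  have hmeta_nodup : metadata.Nodup := hnd.of_map
  have hknown_nodup : (metadata.filter (fun kv => CALC_KEY_ORDER.contains kv.1)).Nodup :=
    hmeta_nodup.filter _
  have hF_nodup : F.Nodup := by
    refine ((pvOrder_nodup.filter _).map ?_)
    intro a b hab
    simpa using congrArg Prod.fst hab
  have hkeys : d.keys = metadata.map Prod.fst := rfl
  have hmem : ∀ p : String × String,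
      p ∈ F ↔ p ∈ metadata.filter (fun kv => CALC_KEY_ORDER.contains kv.1) := by
    intro p
    constructor
    · rintro hpF
      rcases List.mem_map.mp hpF with ⟨k, hk, rfl⟩
      rcases List.mem_filter.mp hk with ⟨hkORD, hkd⟩
      have hkkeys : k ∈ d.keys := (PySem.Dict.contains_iff_mem_keys _ _).mp hkd
      rw [hkeys] at hkkeys
      rcases List.mem_map.mp hkkeys with ⟨q, hq, hqk⟩
      have hv : d.getD q.1 "" = q.2 := pvGetD_self metadata hnd hq
      refine List.mem_filter.mpr ⟨?_, ?_⟩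
      · have : (k, d.getD k "") = q := by
          rw [← hqk]; exact Prod.ext rfl (by rw [hv])
        simpa [this] using hq
      · simpa [hqk] using (by simpa using hkORD)
    · intro hp
      rcases List.mem_filter.mp hp with ⟨hpm, hpord⟩
      have hkd : d.contains p.1 = true := by
        refine (PySem.Dict.contains_iff_mem_keys _ _).mpr ?_
        rw [hkeys]; exact List.mem_map.mpr ⟨p, hpm, rfl⟩
      have hv : d.getD p.1 "" = p.2 := pvGetD_self metadata hnd hpm
      refine List.mem_map.mpr ⟨p.1, List.mem_filter.mpr ⟨?_, hkd⟩, ?_⟩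
      · simpa using hpord
      · exact Prod.ext rfl (by rw [hv])
  have hperm : F.Perm (metadata.filter (fun kv => CALC_KEY_ORDER.contains kv.1)) :=
    (List.perm_ext_iff_of_nodup hF_nodup hknown_nodup).mpr hmem
  have hpw : F.Pairwise (fun a b => pvKeyIdx a < pvKeyIdx b) := by
    have hsub : (CALC_KEY_ORDER.filter (fun k => d.contains k)).Pairwise
        (fun a b => (PySem.List.index? CALC_KEY_ORDER a).getD 0 <
                    (PySem.List.index? CALC_KEY_ORDER b).getD 0) :=
      pvOrder_pairwise.sublist List.filter_sublist
    exact (List.pairwise_map.mpr (by simpa [pvKeyIdx] using hsub))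
  exact PySem.List.sorted_eq_of_perm_of_pairwise_lt _ _ _ hperm hpw

-- A's second loop equals the unknown part of B
theorem pvBack_eq (metadata : List (String × String))
    (hnd : (metadata.map Prod.fst).Nodup) :
    ((metadata.map Prod.fst).filter (fun k => !(CALC_KEY_ORDER.contains k))).map
        (fun k => (k, (PySem.Dict.mk metadata).getD k ""))
      = metadata.filter (fun kv => !(CALC_KEY_ORDER.contains kv.1)) := by
  rw [List.filter_map]
  rw [List.map_map]
  refine List.map_congr_left ?_ |>.trans (List.map_id _)
  intro p hp
  have hpm : p ∈ metadata := List.mem_of_mem_filter hp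
  have hv : (PySem.Dict.mk metadata).getD p.1 "" = p.2 := pvGetD_self metadata hnd hpm
  simp [Function.comp, hv]

-- ===== VERDICT (by name: the statement is the Claim_ definition above) =====
theorem ordered_metadata_py_spec : Claim_equal_ordered_metadata_py := by
  intro metadata _ hpre
  unfold Spec_ordered_metadata_py ordered_metadata_py ordered_metadata_py_alt
  have hpre' : (metadata.map Prod.fst).Nodup := hpre
  rw [PySem.List.foldl_append_if, PySem.List.foldl_append_if]
  simp only [List.nil_append]
  have hkeys : (PySem.Dict.mk metadata).keys = metadata.map Prod.fst := rfl
  rw [hkeys, pvBack_eq metadata hpre', ← pvFront_eq metadata hpre']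
  rfl
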